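-- pv_equiv track=rewrite | github.com/YifeiSun09/python3 | codes/检测矩阵中的升序序列.py | solve
-- ===== SOURCE A (Python) =====
-- def solve(matrix):
--     if matrix == []:
--         return 0
--     n = len(matrix) # n行
--     m = len(matrix[0]) #m列
--     cols = 0
--     for i in range(n):
--         last_inc = 0
--         inc = 0
--         for j in range(1,m):
--             inc = -1 if matrix[i][j] > matrix[i][j-1] else 1
--             if last_inc == 0:
--                 last_inc = inc
--             if last_inc != inc:
--                 break
--         if last_inc == inc:
--             cols += 1
--     return cols
-- ===== SOURCE B (Python) =====
-- def solve(matrix):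
--     if not matrix:
--         return 0
--     width = len(matrix[0])
--     count = 0
--     for row in matrix:
--         seg = row[:width]
--         if sorted(set(seg)) == seg or sorted(seg, reverse=True) == seg:
--             count += 1
--     return count
-- ===== Notes on version B (the rewrite author's own statement) =====
-- stated objective: alternative
-- what changed: A simulates a stateful index-driven scan over column indices (last_inc/inc sentinel codes with an early break); B instead slices each row to the first row's width and tests monotonicity by a sorting-based characterisation: the row counts iff sorted(set(seg)) == seg (strictly increasing) or sorted(seg, reverse=True) == seg (non-increasing) - no adjacent-pair scan at all. Pre_ excludes exactly the inputs on which A raises IndexError: matrices whose first-row width is >= 2 containing a shorter monotone row, where the inner loop runs off the short row.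
import Mathlib
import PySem

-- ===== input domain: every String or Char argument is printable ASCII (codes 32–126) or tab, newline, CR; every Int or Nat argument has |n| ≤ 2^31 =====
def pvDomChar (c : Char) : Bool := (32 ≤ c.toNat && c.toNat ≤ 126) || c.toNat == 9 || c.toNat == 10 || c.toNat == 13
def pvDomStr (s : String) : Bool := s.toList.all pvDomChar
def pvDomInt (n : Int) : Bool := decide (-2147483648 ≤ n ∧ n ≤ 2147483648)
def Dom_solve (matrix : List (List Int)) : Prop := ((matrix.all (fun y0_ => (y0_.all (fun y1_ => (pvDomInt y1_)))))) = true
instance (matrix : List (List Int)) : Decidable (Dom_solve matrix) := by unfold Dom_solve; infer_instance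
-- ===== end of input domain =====

-- B replaces A's stateful index scan (sentinel codes, break) by a sorting-based test per row:
-- a row counts iff sorted(set(seg)) == seg (strictly increasing) or sorted(seg, reverse=True) == seg
-- (non-increasing) — a different characterisation of monotonicity (objective: alternative).

-- ===== PORT A =====
-- inner loop 'for j in range(1, m): …' with state (last_inc, inc) and the break
def solveInner (row : List Int) : List Int → Int → Int → Int × Int
  | [], last_inc, inc => (last_inc, inc)
  | j :: js, last_inc, _inc =>
    let inc' : Int :=
      if PySem.List.pyGetD row j 0 > PySem.List.pyGetD row (j - 1) 0 then -1 else 1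
    let last' : Int := if last_inc = 0 then inc' else last_inc
    if last' ≠ inc' then (last', inc')  -- break
    else solveInner row js last' inc'

def solve (matrix : List (List Int)) : Int :=
  if matrix = [] then 0
  else
    let n : Int := PySem.List.len matrix
    let m : Int := PySem.List.len (PySem.List.pyGetD matrix 0 [])
    (PySem.List.pyRange 0 n 1).foldl
      (fun cols i =>
        let row := PySem.List.pyGetD matrix i []
        -- 'last_inc, inc = <inner loop>' kept as the pair r; 'if last_inc == inc'
        let r := solveInner row (PySem.List.pyRange 1 m 1) 0 0
        if r.1 = r.2 then cols + 1 else cols)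
      0

-- ===== PORT B =====
def solve_alt (matrix : List (List Int)) : Int :=
  if matrix = [] then 0    -- if not matrix: return 0
  else
    let width : Int := PySem.List.len (PySem.List.pyGetD matrix 0 [])
    matrix.foldl
      (fun count row =>
        let seg := PySem.List.slice row none (some width)      -- seg = row[:width]
        -- sorted(set(seg)) == seg or sorted(seg, reverse=True) == seg
        if PySem.List.sorted (PySem.Set.ofList seg) (fun x => x) = seg ∨
           PySem.List.sorted seg (fun x => x) true = seg
        then count + 1 else count)
      0

-- ===== PRECONDITION & SPEC =====
-- Pre_ excludes exactly the inputs on which A raises IndexError: matrices whose first row's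
-- width is ≥ 2 and which contain a shorter row that is monotone (strictly increasing or
-- non-increasing) throughout, so that the inner loop never breaks before running off the row.
def Pre_solve (matrix : List (List Int)) : Prop :=
  ∀ row ∈ matrix, (matrix.headD []).length ≤ row.length ∨ (matrix.headD []).length ≤ 1 ∨
    ¬ (List.IsChain (· < ·) row ∨ List.IsChain (· ≥ ·) row)
instance (matrix : List (List Int)) : Decidable (Pre_solve matrix) := by
  unfold Pre_solve; infer_instance
def pvWitness_solve : List (List Int) := [[1, 2, 3], [3, 1, 1], [1, 0, 2]]
def Spec_solve (matrix : List (List Int)) (out : Int) : Prop := out = solve_alt matrix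
instance (matrix : List (List Int)) (out : Int) : Decidable (Spec_solve matrix out) := by unfold Spec_solve; infer_instance

-- ===== CLAIM (what is proved, stated in full; the proofs are below) =====
def Claim_equal_solve : Prop := ∀ (matrix : List (List Int)), Dom_solve matrix → Pre_solve matrix → Spec_solve matrix (solve matrix)

-- ===== LEMMAS AND PROOFS =====

-- abstract version of A's inner loop, over the list of adjacent comparisons
def loopB : List Bool → Int → Int → Int × Int
  | [], last_inc, inc => (last_inc, inc)
  | b :: bs, last_inc, _inc =>
    let inc' : Int := if b then -1 else 1
    let last' : Int := if last_inc = 0 then inc' else last_inc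
    if last' ≠ inc' then (last', inc')
    else loopB bs last' inc'

def ups (row : List Int) : List Bool :=
  (row.zip (row.drop 1)).map (fun p => decide (p.2 > p.1))

lemma solveInner_bridge (row : List Int) :
    ∀ (t : List Int) (a : Int) (j : Nat) (last_inc inc : Int),
      row.drop j = a :: t →
      solveInner row (PySem.List.pyRange (j + 1) row.length 1) last_inc inc
        = loopB (ups (a :: t)) last_inc inc := by
  intro t
  induction t with
  | nil =>
    intro a j last_inc inc hdrop
    have hj : j + 1 = row.length := by
      have := congrArg List.length hdrop
      simp [List.length_drop] at this
      omega
    simp [PySem.List.pyRange_one_eq_nil (by omega : (row.length : Int) ≤ (j : Int) + 1),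
      solveInner, ups, loopB]
  | cons b t ih =>
    intro a j last_inc inc hdrop
    have hlen : j + 2 ≤ row.length := by
      have := congrArg List.length hdrop
      simp [List.length_drop] at this
      omega
    have ha : row[j]? = some a := by
      have h : (List.drop j row)[0]? = row[j + 0]? := List.getElem?_drop
      rw [hdrop] at h; simpa using h.symm
    have hb : row[j + 1]? = some b := by
      have h : (List.drop j row)[1]? = row[j + 1]? := List.getElem?_drop
      rw [hdrop] at h; simpa using h.symm
    have hga : PySem.List.pyGetD row (j : Int) 0 = a := by
      simp [PySem.List.pyGetD_natCast, List.getD, ha]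
    have hgb : PySem.List.pyGetD row ((j : Int) + 1) 0 = b := by
      have : ((j : Int) + 1) = ((j + 1 : Nat) : Int) := by push_cast; ring_nf
      rw [this, PySem.List.pyGetD_natCast]
      simp [List.getD, hb]
    have hdrop' : row.drop (j + 1) = b :: t := by
      have h1 : List.drop 1 (List.drop j row) = b :: t := by rw [hdrop]; simp
      simpa [List.drop_drop, Nat.add_comm] using h1
    rw [PySem.List.pyRange_one_cons (by omega : (j : Int) + 1 < (row.length : Int))]
    show solveInner row (((j : Int) + 1) :: PySem.List.pyRange ((j : Int) + 1 + 1) row.length 1)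
        last_inc inc = _
    rw [solveInner]
    simp only [show (j : Int) + 1 - 1 = (j : Int) by ring, hga, hgb]
    rw [ups]
    simp only [List.drop_one, List.tail_cons, List.zip_cons_cons, List.map_cons]
    rw [loopB]
    simp only [decide_eq_true_eq]
    by_cases hbr : (if last_inc = 0 then (if b > a then (-1 : Int) else 1) else last_inc)
        ≠ (if b > a then (-1 : Int) else 1)
    · simp only [if_pos hbr]
    · simp only [if_neg hbr]
      have : (j : Int) + 1 + 1 = ((j + 1 : Nat) : Int) + 1 := by push_cast; ring
      rw [this, ih b (j + 1) _ _ hdrop']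
      rfl

lemma loopB_run (v : Int) (hv : v ≠ 0) :
    ∀ bs : List Bool,
      ((loopB bs v v).1 = (loopB bs v v).2 ↔ ∀ b ∈ bs, (if b then (-1 : Int) else 1) = v) := by
  intro bs
  induction bs with
  | nil => simp [loopB]
  | cons b bs ih =>
    rw [loopB]
    simp only [if_neg hv]
    by_cases hbv : (if b then (-1 : Int) else 1) = v
    · rw [if_neg (by simp [hbv]), hbv, ih]
      simp [hbv]
    · rw [if_pos (by simp; omega)]
      simp only [List.mem_cons]
      constructor
      · intro h; exact absurd h.symm hbv
      · intro h; exact absurd (h b (Or.inl rfl)) hbv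

lemma loopB_cond (bs : List Bool) :
    (loopB bs 0 0).1 = (loopB bs 0 0).2 ↔ ((∀ b ∈ bs, b = true) ∨ (∀ b ∈ bs, b = false)) := by
  cases bs with
  | nil => simp [loopB]
  | cons b bs =>
    have hstep : loopB (b :: bs) 0 0
        = loopB bs (if b then (-1 : Int) else 1) (if b then (-1 : Int) else 1) := by
      rw [loopB]; simp
    rw [hstep, loopB_run (if b then (-1 : Int) else 1) (by cases b <;> simp)]
    cases b <;> simp only [if_pos, List.mem_cons] <;>
      constructor
    · intro h
      right
      rintro b' (rfl | hb')
      · rfl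
      · have := h b' hb'; cases b' <;> simp_all
    · rintro (h | h) b' hb'
      · exact absurd (h false (Or.inl rfl)) (by simp)
      · have := h b' (Or.inr hb'); subst this; simp
    · intro h
      left
      rintro b' (rfl | hb')
      · rfl
      · have := h b' hb'; cases b' <;> simp_all
    · rintro (h | h) b' hb'
      · have := h b' (Or.inr hb'); subst this; simp
      · exact absurd (h true (Or.inl rfl)) (by simp)

lemma row_cond (row : List Int) :
    ((solveInner row (PySem.List.pyRange 1 row.length 1) 0 0).1
      = (solveInner row (PySem.List.pyRange 1 row.length 1) 0 0).2)
    ↔ ((∀ b ∈ ups row, b = true) ∨ (∀ b ∈ ups row, b = false)) := by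
  cases row with
  | nil =>
    simp [PySem.List.pyRange_one_eq_nil (by norm_num : (0 : Int) ≤ 1), solveInner, ups]
  | cons a t =>
    have h := solveInner_bridge (a :: t) t a 0 0 0 (by simp)
    simp only [Nat.cast_zero, zero_add] at h
    rw [h, loopB_cond]

lemma take_agree (row : List Int) (w : Nat) (hw : w ≤ row.length) (j : Int)
    (h1 : 0 ≤ j) (h2 : j < (w : Int)) :
    PySem.List.pyGetD row j 0 = PySem.List.pyGetD (row.take w) j 0 := by
  have hjw : j.toNat < w := by omega
  rw [PySem.List.pyGetD_eq_getElem row 0 h1 (by omega),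
    PySem.List.pyGetD_eq_getElem (row.take w) 0 h1 (by simp [List.length_take]; omega)]
  rw [List.getElem_take]

lemma solveInner_congr (row seg : List Int) :
    ∀ (js : List Int) (l i : Int),
      (∀ j ∈ js, PySem.List.pyGetD row j 0 = PySem.List.pyGetD seg j 0 ∧
        PySem.List.pyGetD row (j - 1) 0 = PySem.List.pyGetD seg (j - 1) 0) →
      solveInner row js l i = solveInner seg js l i := by
  intro js
  induction js with
  | nil => intro l i _; rfl
  | cons j js ih =>
    intro l i h
    obtain ⟨h1, h2⟩ := h j (List.mem_cons_self ..)
    rw [solveInner, solveInner, h1, h2]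
    by_cases hb : (if l = 0
          then (if PySem.List.pyGetD seg j 0 > PySem.List.pyGetD seg (j - 1) 0 then (-1 : Int) else 1)
          else l)
        ≠ (if PySem.List.pyGetD seg j 0 > PySem.List.pyGetD seg (j - 1) 0 then (-1 : Int) else 1)
    · simp only [if_pos hb]
    · simp only [if_neg hb]
      exact ih _ _ (fun j' hj' => h j' (List.mem_cons_of_mem _ hj'))

lemma ups_forall_true (row : List Int) :
    (∀ b ∈ ups row, b = true) ↔ List.IsChain (· < ·) row := by
  induction row with
  | nil => simp [ups]
  | cons a t ih =>
    cases t with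
    | nil => simp [ups]
    | cons b t' =>
      simp only [ups, List.drop_one, List.tail_cons, List.zip_cons_cons, List.map_cons,
        List.mem_cons, List.isChain_cons_cons] at ih ⊢
      constructor
      · intro h
        refine ⟨by have := h _ (Or.inl rfl); simpa using this, ih.mp ?_⟩
        intro x hx; exact h x (Or.inr hx)
      · rintro ⟨hab, hc⟩ x hx
        rcases hx with rfl | hx
        · simpa using hab
        · exact ih.mpr hc x hx

lemma ups_forall_false (row : List Int) :
    (∀ b ∈ ups row, b = false) ↔ List.IsChain (· ≥ ·) row := by
  induction row with
  | nil => simp [ups]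
  | cons a t ih =>
    cases t with
    | nil => simp [ups]
    | cons b t' =>
      simp only [ups, List.drop_one, List.tail_cons, List.zip_cons_cons, List.map_cons,
        List.mem_cons, List.isChain_cons_cons] at ih ⊢
      constructor
      · intro h
        refine ⟨?_, ih.mp (fun x hx => h x (Or.inr hx))⟩
        have := h _ (Or.inl rfl); simp at this; omega
      · rintro ⟨hab, hc⟩ x hx
        rcases hx with rfl | hx
        · simp; omega
        · exact ih.mpr hc x hx

-- once the inner loop's state is a fixed nonzero direction v and the remaining row is not
-- all-v, the loop breaks before running past the row, so the range end does not matter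
lemma solveInner_ext (row : List Int) :
    ∀ (t : List Int) (a : Int) (j : Nat) (E v : Int),
      v ≠ 0 →
      row.drop j = a :: t →
      (row.length : Int) ≤ E →
      (¬ ∀ b ∈ ups (a :: t), (if b then (-1 : Int) else 1) = v) →
      solveInner row (PySem.List.pyRange ((j : Int) + 1) E 1) v v
        = solveInner row (PySem.List.pyRange ((j : Int) + 1) row.length 1) v v := by
  intro t
  induction t with
  | nil =>
    intro a j E v hv hdrop hE hne
    exact absurd (by simp [ups]) hne
  | cons b t ih =>
    intro a j E v hv hdrop hE hne
    have hlen : j + 2 ≤ row.length := by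
      have := congrArg List.length hdrop
      simp [List.length_drop] at this
      omega
    have ha : row[j]? = some a := by
      have h : (List.drop j row)[0]? = row[j + 0]? := List.getElem?_drop
      rw [hdrop] at h; simpa using h.symm
    have hb : row[j + 1]? = some b := by
      have h : (List.drop j row)[1]? = row[j + 1]? := List.getElem?_drop
      rw [hdrop] at h; simpa using h.symm
    have hga : PySem.List.pyGetD row (j : Int) 0 = a := by
      simp [PySem.List.pyGetD_natCast, List.getD, ha]
    have hgb : PySem.List.pyGetD row ((j : Int) + 1) 0 = b := by
      have : ((j : Int) + 1) = ((j + 1 : Nat) : Int) := by push_cast; ring_nf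
      rw [this, PySem.List.pyGetD_natCast]
      simp [List.getD, hb]
    have hdrop' : row.drop (j + 1) = b :: t := by
      have h1 : List.drop 1 (List.drop j row) = b :: t := by rw [hdrop]; simp
      simpa [List.drop_drop, Nat.add_comm] using h1
    rw [PySem.List.pyRange_one_cons (by omega : (j : Int) + 1 < E),
      PySem.List.pyRange_one_cons (by omega : (j : Int) + 1 < (row.length : Int))]
    rw [solveInner, solveInner]
    simp only [show (j : Int) + 1 - 1 = (j : Int) by ring, hga, hgb, if_neg hv]
    by_cases hbr : v ≠ (if b > a then (-1 : Int) else 1)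
    · simp only [if_pos hbr]
    · simp only [if_neg hbr]
      have hbr' : v = (if b > a then (-1 : Int) else 1) := not_not.mp hbr
      rw [← hbr']
      have hcast : (j : Int) + 1 + 1 = ((j + 1 : Nat) : Int) + 1 := by push_cast; ring
      rw [hcast, ih b (j + 1) E v hv hdrop' hE ?_]
      intro hall
      apply hne
      intro x hx
      simp only [ups, List.drop_one, List.tail_cons, List.zip_cons_cons, List.map_cons,
        List.mem_cons] at hx
      rcases hx with rfl | hx
      · cases hab : decide (b > a) <;> simp_all
      · exact hall x hx

-- for a non-monotone row the inner loop breaks early, so any range end ≥ the row's length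
-- gives the same result as the row's own length
lemma solveInner_clip (row : List Int) (E : Int) (hE : (row.length : Int) ≤ E)
    (hmix : ¬ ((∀ b ∈ ups row, b = true) ∨ (∀ b ∈ ups row, b = false))) :
    solveInner row (PySem.List.pyRange 1 E 1) 0 0
      = solveInner row (PySem.List.pyRange 1 row.length 1) 0 0 := by
  match row with
  | [] => exact absurd (by simp [ups]) hmix
  | [a] => exact absurd (by simp [ups]) hmix
  | a :: b :: t =>
    have hga : PySem.List.pyGetD (a :: b :: t) (0 : Int) 0 = a := by
      simp [PySem.List.pyGetD_zero_cons]
    have hgb : PySem.List.pyGetD (a :: b :: t) (1 : Int) 0 = b := by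
      have : (1 : Int) = ((1 : Nat) : Int) := by norm_num
      rw [this, PySem.List.pyGetD_natCast]; rfl
    have hlen2 : (2 : Int) ≤ ((a :: b :: t).length : Int) := by simp; omega
    rw [PySem.List.pyRange_one_cons (by omega : (1 : Int) < E),
      PySem.List.pyRange_one_cons (by omega : (1 : Int) < ((a :: b :: t).length : Int))]
    rw [solveInner, solveInner]
    simp only [show (1 : Int) - 1 = (0 : Int) by ring, hga, hgb, if_true]
    rw [if_neg (show ¬ ((if b > a then (-1 : Int) else 1) ≠ (if b > a then (-1 : Int) else 1))
      from fun h => h rfl)]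
    rw [if_neg (show ¬ ((if b > a then (-1 : Int) else 1) ≠ (if b > a then (-1 : Int) else 1))
      from fun h => h rfl)]
    have h2 : (1 : Int) + 1 = ((1 : Nat) : Int) + 1 := by norm_num
    rw [h2, solveInner_ext (a :: b :: t) t b 1 E (if b > a then (-1 : Int) else 1)
      (by split <;> norm_num) (by simp) hE ?_]
    intro hall
    apply hmix
    have hx1 : ∀ x ∈ ups (a :: b :: t), (if x then (-1 : Int) else 1) = (if b > a then (-1 : Int) else 1) := by
      intro x hx
      simp only [ups, List.drop_one, List.tail_cons, List.zip_cons_cons, List.map_cons,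
        List.mem_cons] at hx
      rcases hx with rfl | hx
      · cases hab : decide (b > a) <;> simp_all
      · exact hall x hx
    by_cases hab : b > a
    · left
      intro x hx
      have := hx1 x hx
      simp [if_pos hab] at this
      cases x <;> simp_all
    · right
      intro x hx
      have := hx1 x hx
      simp [if_neg hab] at this
      cases x <;> simp_all

-- set(xs) of a duplicate-free list is the list itself
lemma ofList_pre (xs : List Int) : ∀ (acc : List Int), (acc ++ xs).Nodup →
    xs.foldl PySem.Set.add acc = acc ++ xs := by
  induction xs with
  | nil => intro acc _; simp
  | cons x t ih =>
    intro acc h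
    have hx : x ∉ acc := by
      intro hx
      exact (List.disjoint_of_nodup_append h) hx (List.mem_cons_self ..)
    rw [List.foldl_cons]
    have : PySem.Set.add acc x = acc ++ [x] := by
      simp [PySem.Set.add, PySem.Set.contains, List.contains_eq_mem, hx]
    rw [this, ih (acc ++ [x]) (by simpa using h)]
    simp

lemma ofList_self (xs : List Int) (h : xs.Nodup) : PySem.Set.ofList xs = xs := by
  simpa using ofList_pre xs [] (by simpa using h)

-- B's sorting-based test characterises the same monotonicity conditions
lemma cond_iff (l : List Int) :
    (PySem.List.sorted (PySem.Set.ofList l) (fun x => x) = l ∨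
      PySem.List.sorted l (fun x => x) true = l)
    ↔ ((∀ b ∈ ups l, b = true) ∨ (∀ b ∈ ups l, b = false)) := by
  rw [ups_forall_true, ups_forall_false]
  constructor
  · rintro (h | h)
    · left
      have hp : List.Pairwise (· < ·) l := by
        have := PySem.List.sorted_ofList_pairwise_lt (κ := Int) l
        rwa [h] at this
      exact List.isChain_iff_pairwise.mpr hp
    · right
      have hp : List.Pairwise (fun a b : Int => b ≤ a) l := by
        have := PySem.List.sorted_pairwise_rev l (fun x => x)
        rwa [h] at this
      exact List.isChain_iff_pairwise.mpr (hp.imp (fun h => h))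
  · rintro (h | h)
    · left
      have hp : List.Pairwise (· < ·) l := List.isChain_iff_pairwise.mp h
      have hnd : l.Nodup := hp.imp (fun h => ne_of_lt h)
      rw [ofList_self l hnd]
      exact PySem.List.sorted_eq_self_of_pairwise l _ (hp.imp (fun h => le_of_lt h))
    · right
      have hp : List.Pairwise (fun a b : Int => a ≥ b) l := List.isChain_iff_pairwise.mp h
      exact PySem.List.sorted_rev_eq_self_of_pairwise l _ (hp.imp (fun h => h))

-- per-row agreement of the two counting conditions, under the per-row Pre_ disjunct
lemma row_iff (row : List Int) (w : Nat)
    (hp : w ≤ row.length ∨ w ≤ 1 ∨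
      ¬ (List.IsChain (· < ·) row ∨ List.IsChain (· ≥ ·) row)) :
    ((solveInner row (PySem.List.pyRange 1 (w : Int) 1) 0 0).1
      = (solveInner row (PySem.List.pyRange 1 (w : Int) 1) 0 0).2)
    ↔ (PySem.List.sorted (PySem.Set.ofList (row.take w)) (fun x => x) = row.take w ∨
        PySem.List.sorted (row.take w) (fun x => x) true = row.take w) := by
  by_cases hwle : w ≤ row.length
  · -- the row is at least as long as the width: A scans exactly the w-prefix
    have hagree : ∀ j ∈ PySem.List.pyRange 1 (w : Int) 1,
        PySem.List.pyGetD row j 0 = PySem.List.pyGetD (row.take w) j 0 ∧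
        PySem.List.pyGetD row (j - 1) 0 = PySem.List.pyGetD (row.take w) (j - 1) 0 := by
      intro j hj
      rw [PySem.List.mem_pyRange_one] at hj
      exact ⟨take_agree row w hwle j (by omega) (by omega),
        take_agree row w hwle (j - 1) (by omega) (by omega)⟩
    have htl : ((row.take w).length : Int) = (w : Int) := by
      simp [List.length_take]; omega
    rw [solveInner_congr row (row.take w) _ 0 0 hagree, ← htl, row_cond (row.take w),
      cond_iff (row.take w)]
  · rcases hp with hp | hp | hp
    · omega
    · -- width ≤ 1: the inner loop is empty and the row must be empty too
      have hrow : row = [] := List.eq_nil_of_length_eq_zero (by omega)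
      subst hrow
      rw [PySem.List.pyRange_one_eq_nil (by omega : (w : Int) ≤ 1)]
      simp only [solveInner, List.take_nil, true_iff]
      exact Or.inl (PySem.List.sorted_eq_self_of_pairwise [] _ (by simp))
    · -- short non-monotone row: the loop breaks before running off the row
      have hmix : ¬ ((∀ b ∈ ups row, b = true) ∨ (∀ b ∈ ups row, b = false)) := by
        rw [ups_forall_true, ups_forall_false]; exact hp
      rw [solveInner_clip row (w : Int) (by omega) hmix, row_cond row,
        List.take_of_length_le (by omega : row.length ≤ w), cond_iff row]

theorem solve_spec : Claim_equal_solve := by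
  intro matrix _ hpre
  unfold Spec_solve
  unfold solve solve_alt
  by_cases hm : matrix = []
  · subst hm; simp
  · rw [if_neg hm, if_neg hm]
    simp only [PySem.List.len_eq]
    refine Eq.trans (PySem.List.foldl_pyRange_zero_pyGetD' matrix []
      (fun cols row =>
        if (solveInner row (PySem.List.pyRange 1 ((PySem.List.pyGetD matrix 0 []).length : Int) 1) 0 0).1
            = (solveInner row (PySem.List.pyRange 1 ((PySem.List.pyGetD matrix 0 []).length : Int) 1) 0 0).2
          then cols + 1 else cols) 0) ?_
    apply PySem.List.foldl_congr_mem
    intro cols row hrow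
    have h0 : PySem.List.pyGetD matrix 0 [] = matrix.headD [] := by
      cases matrix with
      | nil => simp at hm
      | cons x xs => simp [PySem.List.pyGetD_zero_cons]
    set w : Nat := (matrix.headD []).length with hw
    have hseg : PySem.List.slice row none (some ((PySem.List.pyGetD matrix 0 []).length : Int))
        = row.take w := by
      rw [h0, PySem.List.slice_to_natCast]
    have hiff := row_iff row w (hpre row hrow)
    have hA : PySem.List.pyRange 1 ((PySem.List.pyGetD matrix 0 []).length : Int) 1
        = PySem.List.pyRange 1 (w : Int) 1 := by rw [h0]
    rw [hA]
    show (if (solveInner row (PySem.List.pyRange 1 (w : Int) 1) 0 0).1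
        = (solveInner row (PySem.List.pyRange 1 (w : Int) 1) 0 0).2
        then cols + 1 else cols)
      = _
    simp only [hseg]
    by_cases hc : (solveInner row (PySem.List.pyRange 1 (w : Int) 1) 0 0).1
        = (solveInner row (PySem.List.pyRange 1 (w : Int) 1) 0 0).2
    · rw [if_pos hc, if_pos (hiff.mp hc)]
    · rw [if_neg hc, if_neg (fun h => hc (hiff.mpr h))]
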